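-- pv_equiv track=rewrite | github.com/HyoketsuSenpai/Leetcode-Questions | Maximum Score After Splitting a String.py | maxScore
-- ===== SOURCE A (Python) =====
-- def maxScore(s: str) -> int:
--     z = s.count('0')
--     o = len(s) - z
--     score = 0
--     co = o
--     cz = 1
--     if s[0] == '1':
--         co -= 1
--         cz -= 1
--     score = co + cz
--
--     for i in range(1, z + o - 1):
--         if s[i] == '1':
--             co -= 1
--         else:
--             cz += 1
--         score = max(score, co + cz)
--
--     return score
-- ===== SOURCE B (Python) =====
-- def maxScore(s: str) -> int:
--     # score of split k  =  (# non-'0' chars of s)  +  balance of s[:k],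
--     # where balance counts +1 per non-'1' char and -1 per '1' char.
--     # Brute force: recompute the prefix balance for every split index.
--     nz = sum(1 for c in s if c != '0')
--     return nz + max(sum(-1 if c == '1' else 1 for c in s[:k])
--                     for k in range(1, max(2, len(s))))
-- ===== Notes on version B (the rewrite author's own statement) =====
-- stated objective: alternative
-- what changed: A keeps running counters in one incremental pass; B brute-forces the split: for each split index k it re-scans the prefix s[:k] to compute that split's score (as a count of non-'0' chars plus a prefix balance) and takes the max over all splits.
import Mathlib
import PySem

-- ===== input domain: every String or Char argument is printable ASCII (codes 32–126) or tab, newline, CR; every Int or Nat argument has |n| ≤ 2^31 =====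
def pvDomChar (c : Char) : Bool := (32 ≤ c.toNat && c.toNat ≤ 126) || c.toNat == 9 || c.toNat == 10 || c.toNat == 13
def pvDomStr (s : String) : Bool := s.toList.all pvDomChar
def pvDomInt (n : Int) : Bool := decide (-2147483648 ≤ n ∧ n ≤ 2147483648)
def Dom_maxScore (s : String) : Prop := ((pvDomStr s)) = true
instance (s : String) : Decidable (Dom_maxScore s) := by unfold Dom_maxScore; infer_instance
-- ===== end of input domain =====

-- B replaces A's single incremental counter pass by a per-split brute force (max over re-scanned
-- prefixes); equivalence of the RETURN values is proved on all nonempty strings (A raises on "").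

-- ===== PORT A =====
def maxScore (s : String) : Int :=
  let z : Int := (PySem.Str.count s "0" : Int)
  let o : Int := PySem.Str.len s - z
  let score : Int := 0
  let cocz : Int × Int :=
    if PySem.Str.pyGet? s 0 = some '1' then (o - 1, 1 - 1) else (o, 1)
  let score : Int := cocz.1 + cocz.2
  let st : Int × Int × Int :=
    List.foldl
      (fun (st : Int × Int × Int) (i : Int) =>
        let cc : Int × Int :=
          if PySem.Str.pyGet? s i = some '1' then (st.2.1 - 1, st.2.2) else (st.2.1, st.2.2 + 1)
        (max st.1 (cc.1 + cc.2), cc.1, cc.2))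
      (score, cocz.1, cocz.2)
      (PySem.List.pyRange 1 (z + o - 1))
  st.1

-- ===== PORT B =====
def maxScore_alt (s : String) : Int :=
  let nz : Int := List.foldl (fun a c => if c ≠ '0' then a + 1 else a) 0 s.toList
  let cands : List Int :=
    List.map
      (fun k =>
        List.foldl (fun a c => a + (if c = '1' then (-1 : Int) else 1)) 0
          (PySem.Str.slice s none (some k)).toList)
      (PySem.List.pyRange 1 (max 2 (PySem.Str.len s)))
  nz + (PySem.List.max? cands (fun v => v)).getD 0

-- ===== PRECONDITION & SPEC =====
-- A reads s[0] unconditionally, so it raises IndexError exactly on the empty string.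
def Pre_maxScore (s : String) : Prop := s.toList ≠ []
instance (s : String) : Decidable (Pre_maxScore s) := by unfold Pre_maxScore; infer_instance
def pvWitness_maxScore : String := "0011"

def Spec_maxScore (s : String) (out : Int) : Prop := out = maxScore_alt s
instance (s : String) (out : Int) : Decidable (Spec_maxScore s out) := by unfold Spec_maxScore; infer_instance

-- ===== CLAIM (what is proved, stated in full; the proofs are below) =====
def Claim_equal_maxScore : Prop := ∀ (s : String), Dom_maxScore s → Pre_maxScore s → Spec_maxScore s (maxScore s)

-- ===== LEMMAS AND PROOFS =====

-- char weight: +1 for a char A counts as a zero on the left, -1 for '1'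
def pvF (c : Char) : Int := if c = '1' then -1 else 1

def pvSumf (xs : List Char) : Int := (xs.map pvF).sum

-- the body of A's loop, applied to the character it indexes
def pvStepA (st : Int × Int × Int) (c : Char) : Int × Int × Int :=
  let cc : Int × Int := if c = '1' then (st.2.1 - 1, st.2.2) else (st.2.1, st.2.2 + 1)
  (max st.1 (cc.1 + cc.2), cc.1, cc.2)

-- the same loop keeping only (score, co+cz)
def pvStep2 (p : Int × Int) (c : Char) : Int × Int := (max p.1 (p.2 + pvF c), p.2 + pvF c)

lemma pv_foldl_sumf (xs : List Char) : ∀ (a : Int),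
    List.foldl (fun a c => a + (if c = '1' then (-1 : Int) else 1)) a xs = a + pvSumf xs := by
  induction xs with
  | nil => intro a; simp [pvSumf]
  | cons c t ih => intro a; rw [List.foldl_cons, ih]; simp [pvSumf, pvF]; ring

lemma pv_nz_eq (l : List Char) : ∀ (a : Int),
    List.foldl (fun a c => if c ≠ '0' then a + 1 else a) a l
      = a + (l.length : Int) - (l.count '0' : Int) := by
  induction l with
  | nil => intro a; simp
  | cons c t ih =>
    intro a
    rw [List.foldl_cons]
    by_cases h : c = '0'
    · rw [if_neg (by simp [h]), ih, List.count_cons, if_pos (by simp [h])]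
      push_cast
      simp
      ring
    · rw [if_pos (by simp [h]), ih, List.count_cons, if_neg (by simp [h])]
      push_cast
      simp
      ring

lemma pv_count_go_single (c : Char) : ∀ (l : List Char) (fuel acc : Nat), l.length ≤ fuel →
    PySem.Chars.count.go [c] fuel l acc = acc + l.count c := by
  intro l
  induction l with
  | nil => intro fuel acc _; cases fuel <;> simp [PySem.Chars.count.go]
  | cons h t ih =>
    intro fuel acc hf
    cases fuel with
    | zero => simp at hf
    | succ m =>
      have hm : t.length ≤ m := by simpa using hf
      by_cases hc : c = h
      · subst hc
        have e : PySem.Chars.count.go [c] (m + 1) (c :: t) acc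
            = PySem.Chars.count.go [c] m t (acc + 1) := by
          simp [PySem.Chars.count.go, List.isPrefixOf]
        rw [e, ih m (acc + 1) hm, List.count_cons, if_pos (by simp)]
        omega
      · have hp : ([c].isPrefixOf (h :: t)) = false := by
          simp [List.isPrefixOf]
          exact hc
        have e : PySem.Chars.count.go [c] (m + 1) (h :: t) acc
            = PySem.Chars.count.go [c] m t acc := by
          simp [PySem.Chars.count.go, hp]
        rw [e, ih m acc hm, List.count_cons,
            if_neg (by simp; exact fun h' => hc h'.symm)]
        omega

lemma pv_str_count_zero (s : String) :
    ((PySem.Str.count s "0" : Nat) : Int) = (s.toList.count '0' : Int) := by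
  have h0 : ("0" : String).toList = ['0'] := rfl
  have hn : PySem.Str.count s "0" = s.toList.count '0' := by
    rw [PySem.Str.count_eq, h0]
    unfold PySem.Chars.count
    rw [if_neg (by simp)]
    rw [pv_count_go_single '0' s.toList s.toList.length 0 (le_refl _)]
    omega
  exact_mod_cast congrArg (fun n : Nat => (n : Int)) hn

lemma pv_L1 (m : List Char) : ∀ (sc co cz : Int),
    (List.foldl pvStepA (sc, co, cz) m).1 = (List.foldl pvStep2 (sc, co + cz) m).1 := by
  induction m with
  | nil => intro sc co cz; rfl
  | cons c t ih =>
    intro sc co cz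
    rw [List.foldl_cons, List.foldl_cons]
    by_cases h : c = '1'
    · have e1 : pvStepA (sc, co, cz) c = (max sc (co - 1 + cz), co - 1, cz) := by
        simp [pvStepA, h]
      have e2 : pvStep2 (sc, co + cz) c = (max sc (co - 1 + cz), co - 1 + cz) := by
        simp [pvStep2, pvF, h]
        constructor <;> ring
      rw [e1, e2, ih (max sc (co - 1 + cz)) (co - 1) cz]
    · have e1 : pvStepA (sc, co, cz) c = (max sc (co + (cz + 1)), co, cz + 1) := by
        simp [pvStepA, h]
      have e2 : pvStep2 (sc, co + cz) c = (max sc (co + (cz + 1)), co + (cz + 1)) := by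
        simp [pvStep2, pvF, h]
        constructor <;> ring
      rw [e1, e2, ih (max sc (co + (cz + 1))) co (cz + 1)]

lemma pv_L4 (m : List Char) : ∀ (v g : Int),
    (List.foldl pvStep2 (v, g) m).1 =
      List.foldl max v ((List.range m.length).map (fun j => g + pvSumf (m.take (j + 1)))) := by
  induction m with
  | nil => intro v g; simp
  | cons c t ih =>
    intro v g
    have hrhs : (List.range (c :: t).length).map (fun j => g + pvSumf ((c :: t).take (j + 1)))
        = (g + pvF c) :: (List.range t.length).map (fun j => (g + pvF c) + pvSumf (t.take (j + 1))) := by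
      rw [List.length_cons, List.range_succ_eq_map, List.map_cons, List.map_map]
      refine congrArg₂ List.cons ?_ ?_
      · simp [pvSumf]
      · apply List.map_congr_left
        intro j _
        simp [Function.comp, pvSumf, List.take_succ_cons]
        ring
    rw [hrhs, List.foldl_cons, List.foldl_cons]
    have e : pvStep2 (v, g) c = (max v (g + pvF c), g + pvF c) := rfl
    rw [e, ih (max v (g + pvF c)) (g + pvF c)]

lemma pv_fold_max_add (xs : List Int) : ∀ (o v : Int),
    List.foldl max (o + v) (xs.map (fun x => o + x)) = o + List.foldl max v xs := by
  induction xs with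
  | nil => intro o v; simp
  | cons x t ih =>
    intro o v
    rw [List.map_cons, List.foldl_cons, List.foldl_cons, max_add_add_left o v x, ih o (max v x)]

lemma pv_shift (N : Int) (c0 : Char) (m : List Char) :
    List.foldl max (N + pvF c0)
        ((List.range m.length).map (fun j => (N + pvF c0) + pvSumf (m.take (j + 1))))
      = N + List.foldl max (pvF c0)
          ((List.range m.length).map (fun j => pvF c0 + pvSumf (m.take (j + 1)))) := by
  rw [← pv_fold_max_add ((List.range m.length).map fun j => pvF c0 + pvSumf (m.take (j + 1))) N (pvF c0),
      List.map_map]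
  refine congrArg (List.foldl max (N + pvF c0)) ?_
  apply List.map_congr_left
  intro j _
  simp [Function.comp]
  ring

lemma pv_A_fold (s : String) (c0 : Char) (t : List Char) (hl : s.toList = c0 :: t) (co cz : Int) :
    (List.foldl
      (fun (st : Int × Int × Int) (i : Int) =>
        let cc : Int × Int :=
          if PySem.Str.pyGet? s i = some '1' then (st.2.1 - 1, st.2.2) else (st.2.1, st.2.2 + 1)
        (max st.1 (cc.1 + cc.2), cc.1, cc.2))
      (co + cz, co, cz)
      (PySem.List.pyRange 1 (((c0 :: t).length : Int) - 1))).1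
    = List.foldl max (co + cz)
        ((List.range t.dropLast.length).map (fun j => (co + cz) + pvSumf (t.dropLast.take (j + 1)))) := by
  have hb : (((c0 :: t).length : Int) - 1) = PySem.List.len (s.toList.dropLast) := by
    rw [PySem.List.len_eq, hl]
    simp
  rw [hb]
  have hcg : ∀ (acc : Int × Int × Int), ∀ x ∈ PySem.List.pyRange 1 (PySem.List.len (s.toList.dropLast)),
      (fun (st : Int × Int × Int) (i : Int) =>
        let cc : Int × Int :=
          if PySem.Str.pyGet? s i = some '1' then (st.2.1 - 1, st.2.2) else (st.2.1, st.2.2 + 1)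
        (max st.1 (cc.1 + cc.2), cc.1, cc.2)) acc x
      = pvStepA acc (PySem.List.pyGetD (s.toList.dropLast) x ' ') := by
    intro acc x hx
    beta_reduce
    obtain ⟨h1, h2⟩ := PySem.List.mem_pyRange_one.mp hx
    rw [PySem.List.len_eq] at h2
    have h0x : (0 : Int) ≤ x := by omega
    have hdl : (s.toList.dropLast).length = s.toList.length - 1 := by simp
    have hxlt : x.toNat < (s.toList.dropLast).length := by omega
    have hxlt2 : x.toNat < s.toList.length := by omega
    have e1 : PySem.Str.pyGet? s x = s.toList[x.toNat]? := by
      conv_lhs => rw [← Int.toNat_of_nonneg h0x]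
      exact PySem.Str.pyGet?_natCast s x.toNat
    have e3 : PySem.List.pyGetD (s.toList.dropLast) x ' ' = (s.toList.dropLast)[x.toNat] :=
      PySem.List.pyGetD_eq_getElem _ ' ' h0x (by omega)
    rw [e1, List.getElem?_eq_getElem hxlt2, e3, List.getElem_dropLast hxlt]
    simp [pvStepA]
  rw [PySem.List.foldl_congr_mem _ _ _ _ hcg]
  rw [PySem.List.foldl_pyRange_pyGetD (s.toList.dropLast) ' ' pvStepA (co + cz, co, cz)
      (by norm_num : (0 : Int) ≤ 1)]
  have hdrop : (s.toList.dropLast).drop (1 : Int).toNat = t.dropLast := by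
    rw [hl]
    cases t <;> simp
  rw [hdrop, pv_L1, pv_L4]

-- A's value on a nonempty string
lemma pv_A_char (s : String) (c0 : Char) (t : List Char) (hl : s.toList = c0 :: t) :
    maxScore s = (((c0 :: t).length : Int) - ((c0 :: t).count '0' : Int)) +
      List.foldl max (pvF c0)
        ((List.range t.dropLast.length).map (fun j => pvF c0 + pvSumf (t.dropLast.take (j + 1)))) := by
  have h0 : PySem.Str.pyGet? s 0 = some c0 := by
    simp [hl]
  simp only [maxScore]
  rw [show ((PySem.Str.count s "0" : Int) + (PySem.Str.len s - (PySem.Str.count s "0" : Int)) - 1)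
      = (((c0 :: t).length : Int) - 1) from by rw [PySem.Str.len_eq, hl]; ring]
  rw [h0]
  by_cases hc : c0 = '1'
  · rw [if_pos (by rw [hc])]
    refine (pv_A_fold s c0 t hl ((PySem.Str.len s - (PySem.Str.count s "0" : Int)) - 1) (1 - 1)).trans ?_
    have hv : ((PySem.Str.len s - (PySem.Str.count s "0" : Int)) - 1) + (1 - 1)
        = ((((c0 :: t).length : Int) - ((c0 :: t).count '0' : Int))) + pvF c0 := by
      rw [PySem.Str.len_eq, pv_str_count_zero, hl]
      simp [pvF, hc]
      omega
    rw [hv, pv_shift]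
  · rw [if_neg (by simp only [Option.some.injEq]; exact hc)]
    refine (pv_A_fold s c0 t hl (PySem.Str.len s - (PySem.Str.count s "0" : Int)) 1).trans ?_
    have hv : (PySem.Str.len s - (PySem.Str.count s "0" : Int)) + 1
        = ((((c0 :: t).length : Int) - ((c0 :: t).count '0' : Int))) + pvF c0 := by
      rw [PySem.Str.len_eq, pv_str_count_zero, hl]
      simp [pvF, hc]
    rw [hv, pv_shift]

-- B's value on a nonempty string
lemma pv_B_char (s : String) (c0 : Char) (t : List Char) (hl : s.toList = c0 :: t) :
    maxScore_alt s = (((c0 :: t).length : Int) - ((c0 :: t).count '0' : Int)) +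
      List.foldl max (pvF c0)
        ((List.range (t.length - 1)).map (fun j => pvF c0 + pvSumf (t.take (j + 1)))) := by
  have hmax : ((max 2 (PySem.Str.len s)) - 1).toNat = (t.length - 1) + 1 := by
    rw [PySem.Str.len_eq, hl]
    simp
    omega
  have hcands : List.map
      (fun k => List.foldl (fun a c => a + (if c = '1' then (-1 : Int) else 1)) 0
        (PySem.Str.slice s none (some k)).toList)
      (PySem.List.pyRange 1 (max 2 (PySem.Str.len s)))
      = List.map (fun k => pvSumf ((c0 :: t).take (k + 1))) (List.range ((t.length - 1) + 1)) := by
    rw [PySem.List.pyRange_one, hmax, List.map_map]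
    apply List.map_congr_left
    intro k hk
    simp only [Function.comp]
    rw [pv_foldl_sumf, zero_add]
    refine congrArg pvSumf ?_
    rw [PySem.Str.toList_slice, PySem.Chars.slice_eq_listSlice,
        PySem.List.slice_to s.toList (by positivity : (0 : Int) ≤ 1 + (k : Int)), hl]
    congr 1
    omega
  simp only [maxScore_alt]
  rw [pv_nz_eq s.toList 0, hcands, List.range_succ_eq_map, List.map_cons, List.map_map,
      PySem.List.max?_id_cons]
  simp only [Option.getD_some]
  rw [hl]
  have hhead : pvSumf ((c0 :: t).take (0 + 1)) = pvF c0 := by simp [pvSumf]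
  have htail : List.map ((fun k => pvSumf ((c0 :: t).take (k + 1))) ∘ Nat.succ) (List.range (t.length - 1))
      = List.map (fun j => pvF c0 + pvSumf (t.take (j + 1))) (List.range (t.length - 1)) := by
    apply List.map_congr_left
    intro j _
    simp [Function.comp, pvSumf, List.take_succ_cons]
  rw [hhead, htail]
  ring_nf

-- ===== VERDICT (by name: the statement is the Claim_ definition above) =====
theorem maxScore_spec : Claim_equal_maxScore := by
  intro s _ hpre
  unfold Spec_maxScore
  obtain ⟨c0, t, hl⟩ : ∃ c0 t, s.toList = c0 :: t := by
    cases h : s.toList with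
    | nil => exact absurd h hpre
    | cons a b => exact ⟨a, b, rfl⟩
  rw [pv_A_char s c0 t hl, pv_B_char s c0 t hl, List.length_dropLast]
  have hmap : (List.range (t.length - 1)).map (fun j => pvF c0 + pvSumf (t.dropLast.take (j + 1)))
      = (List.range (t.length - 1)).map (fun j => pvF c0 + pvSumf (t.take (j + 1))) := by
    apply List.map_congr_left
    intro j hj
    have hj' : j < t.length - 1 := List.mem_range.mp hj
    refine congrArg (fun xs => pvF c0 + pvSumf xs) ?_
    rw [List.dropLast_eq_take, List.take_take]
    rw [show min (j + 1) (t.length - 1) = j + 1 by omega]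
  rw [hmap]
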